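-- pv_equiv track=rewrite | github.com/ht1505/elevator-soft-computing | Demo/05_combined_system_demo.py | nearest_route
-- ===== SOURCE A (Python) =====
-- def nearest_route(current_floor, stops):
--     remaining = stops[:]
--     out = []
--     cur = current_floor
--     while remaining:
--         nxt = min(remaining, key=lambda f: abs(f - cur))
--         out.append(nxt)
--         remaining.remove(nxt)
--         cur = nxt
--     return out
-- ===== SOURCE B (Python) =====
-- def nearest_route(current_floor, stops):
--     arr = sorted(stops)
--     first_at = {}
--     for i, v in enumerate(stops):
--         if v not in first_at:
--             first_at[v] = i
--     n = len(arr)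
--     nl = 0
--     while nl < n and arr[nl] <= current_floor:
--         nl += 1
--     r = nl
--     cur = current_floor
--     out = []
--     for _ in range(n):
--         if nl == 0:
--             pick_left = False
--         elif r == n:
--             pick_left = True
--         else:
--             a, b = arr[nl - 1], arr[r]
--             da, db = cur - a, b - cur
--             pick_left = da < db or (da == db and first_at[a] < first_at[b])
--         if pick_left:
--             cur = arr[nl - 1]
--             nl -= 1
--         else:
--             cur = arr[r]
--             r += 1
--         out.append(cur)
--     return out
-- ===== Notes on version B (the rewrite author's own statement) =====
-- stated objective: faster
-- what changed: Replaced the repeated min-scan-and-remove over the remaining list by one sort plus a two-pointer outward expansion (the visited stops always form a contiguous block of the sorted array), with a first-occurrence-index map to reproduce min's tie-breaking.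
import Mathlib
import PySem

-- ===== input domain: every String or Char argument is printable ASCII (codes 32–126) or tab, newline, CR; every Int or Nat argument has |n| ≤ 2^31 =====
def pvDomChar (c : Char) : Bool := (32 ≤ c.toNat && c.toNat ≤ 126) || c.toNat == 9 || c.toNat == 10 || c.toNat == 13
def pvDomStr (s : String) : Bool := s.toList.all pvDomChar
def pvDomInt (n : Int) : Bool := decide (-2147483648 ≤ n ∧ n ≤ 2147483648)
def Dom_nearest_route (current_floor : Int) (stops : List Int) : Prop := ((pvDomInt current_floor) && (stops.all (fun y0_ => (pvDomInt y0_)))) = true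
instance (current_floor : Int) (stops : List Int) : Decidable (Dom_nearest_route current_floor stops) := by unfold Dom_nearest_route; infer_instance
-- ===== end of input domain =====

-- B replaces A's quadratic min-scan-and-remove loop by sort + two-pointer outward expansion
-- (with a first-occurrence-index map for min's tie-breaking); measured asymptotically faster.

-- ===== PORT A =====
-- the while loop removes exactly one element per iteration, so fuel = remaining.length
def nearestRouteLoop : Nat → Int → List Int → List Int
  | 0, _, _ => []
  | fuel+1, cur, remaining =>
    match PySem.List.min? remaining (fun f => |f - cur|) with
    | none => []
    | some nxt =>
      match PySem.List.remove? remaining nxt with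
      | none => []   -- unreachable: nxt ∈ remaining
      | some rest => nxt :: nearestRouteLoop fuel nxt rest

def nearest_route (current_floor : Int) (stops : List Int) : List Int :=
  nearestRouteLoop stops.length current_floor stops

-- ===== PORT B =====
-- first_at: first-occurrence index of each value in stops
def altFirstAt (stops : List Int) : PySem.Dict Int Int :=
  (PySem.List.enumerate stops).foldl
    (fun d iv => if d.contains iv.2 then d else d.insert iv.2 iv.1) PySem.Dict.empty

-- 'nl = 0; while nl < n and arr[nl] <= current_floor: nl += 1' scans arr left to right
def altNl (cf : Int) : List Int → Nat
  | [] => 0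
  | x :: t => if x ≤ cf then altNl cf t + 1 else 0

-- the 'for _ in range(n)' loop; all arr indices below are in range (0 < nl ≤ |arr|, r < |arr|)
def altGo (arr : List Int) (fa : PySem.Dict Int Int) : Nat → Nat → Nat → Int → List Int
  | 0, _, _, _ => []
  | k+1, nl, r, cur =>
    let pickLeft : Bool :=
      if nl = 0 then false
      else if r = arr.length then true
      else
        let a := arr.getD (nl-1) 0
        let b := arr.getD r 0
        let da := cur - a
        let db := b - cur
        decide (da < db ∨ (da = db ∧ fa.getD a 0 < fa.getD b 0))
    if pickLeft then
      let c := arr.getD (nl-1) 0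
      c :: altGo arr fa k (nl-1) r c
    else
      let c := arr.getD r 0
      c :: altGo arr fa k nl (r+1) c

def nearest_route_alt (current_floor : Int) (stops : List Int) : List Int :=
  let arr := PySem.List.sorted stops (fun x => x)
  let fa := altFirstAt stops
  let nl := altNl current_floor arr
  altGo arr fa arr.length nl nl current_floor

-- ===== PRECONDITION & SPEC =====
def Spec_nearest_route (current_floor : Int) (stops : List Int) (out : List Int) : Prop := out = nearest_route_alt current_floor stops
instance (current_floor : Int) (stops : List Int) (out : List Int) : Decidable (Spec_nearest_route current_floor stops out) := by unfold Spec_nearest_route; infer_instance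

-- ===== CLAIM (what is proved, stated in full; the proofs are below) =====
def Claim_equal_nearest_route : Prop := ∀ (current_floor : Int) (stops : List Int), Dom_nearest_route current_floor stops → Spec_nearest_route current_floor stops (nearest_route current_floor stops)

-- ===== LEMMAS AND PROOFS =====

-- Python min keeps the FIRST element attaining the minimal key: accumulator characterisation.
def pyMinStep (key : Int → Int) : Option Int → Int → Option Int :=
  fun acc x => match acc with
    | none => some x
    | some m => if key x < key m then some x else some m

lemma min?_eq_foldl_pyMinStep (key : Int → Int) (xs : List Int) :
    PySem.List.min? xs key = xs.foldl (pyMinStep key) none := by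
  unfold PySem.List.min? pyMinStep
  congr 1
  funext acc x
  cases acc <;> rfl

lemma min_foldl_first (key : Int → Int) :
    ∀ (xs : List Int) (m w : Int),
      xs.foldl (pyMinStep key) (some m) = some w →
      (w = m ∧ ∀ y ∈ xs, ¬ key y < key m) ∨
      (∃ p q, xs = p ++ w :: q ∧ key w < key m ∧ ∀ y ∈ p, key w < key y) := by
  intro xs
  induction xs with
  | nil => intro m w h; left; simp at h; simp [h]
  | cons z t ih =>
    intro m w h
    simp only [List.foldl_cons] at h
    by_cases hz : key z < key m
    · rw [show pyMinStep key (some m) z = some z by simp [pyMinStep, if_pos hz]] at h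
      rcases ih z w h with ⟨hw, hall⟩ | ⟨p, q, hdec, hlt, hp⟩
      · right; exact ⟨[], t, by simp [hw], by rw [hw]; exact hz, by simp⟩
      · right
        refine ⟨z :: p, q, by simp [hdec], lt_trans hlt hz, ?_⟩
        intro y hy; rcases List.mem_cons.mp hy with rfl | hy'
        · exact hlt
        · exact hp y hy'
    · rw [show pyMinStep key (some m) z = some m by simp [pyMinStep, if_neg hz]] at h
      rcases ih m w h with ⟨hw, hall⟩ | ⟨p, q, hdec, hlt, hp⟩
      · left
        refine ⟨hw, ?_⟩
        intro y hy; rcases List.mem_cons.mp hy with rfl | hy'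
        · exact hz
        · exact hall y hy'
      · right
        refine ⟨z :: p, q, by simp [hdec], hlt, ?_⟩
        intro y hy; rcases List.mem_cons.mp hy with rfl | hy'
        · exact lt_of_lt_of_le hlt (not_lt.mp hz)
        · exact hp y hy'

lemma min?_first {key : Int → Int} {xs : List Int} {w : Int}
    (h : PySem.List.min? xs key = some w) :
    ∃ p q, xs = p ++ w :: q ∧ ∀ y ∈ p, key w < key y := by
  cases xs with
  | cons hd t =>
    rw [min?_eq_foldl_pyMinStep] at h
    have h' : t.foldl (pyMinStep key) (some hd) = some w := h
    rcases min_foldl_first key t hd w h' with ⟨hw, _⟩ | ⟨p, q, hdec, hltx, hp⟩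
    · exact ⟨[], t, by simp [hw], by simp⟩
    · refine ⟨hd :: p, q, by simp [hdec], ?_⟩
      intro y hy; rcases List.mem_cons.mp hy with rfl | hy'
      · exact hltx
      · exact hp y hy'
  | nil => simp [PySem.List.min?] at h

-- altNl on a sorted list splits it into the prefix ≤ cf and the suffix ≥ cf
lemma altNl_le_length (cf : Int) : ∀ l : List Int, altNl cf l ≤ l.length := by
  intro l; induction l with
  | nil => simp [altNl]
  | cons x t ih => by_cases h : x ≤ cf <;> simp [altNl, h] <;> omega

lemma altNl_spec (cf : Int) :
    ∀ l : List Int, l.Pairwise (· ≤ ·) →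
      (∀ x ∈ l.take (altNl cf l), x ≤ cf) ∧ (∀ y ∈ l.drop (altNl cf l), cf ≤ y) := by
  intro l
  induction l with
  | nil => simp
  | cons x t ih =>
    intro hp
    rcases List.pairwise_cons.mp hp with ⟨hx, hpt⟩
    by_cases h : x ≤ cf
    · rcases ih hpt with ⟨ih1, ih2⟩
      rw [show altNl cf (x :: t) = altNl cf t + 1 by simp [altNl, h]]
      constructor
      · intro z hz
        rw [List.take_succ_cons] at hz
        rcases List.mem_cons.mp hz with rfl | hz'
        · exact h
        · exact ih1 z hz'
      · intro y hy
        rw [List.drop_succ_cons] at hy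
        exact ih2 y hy
    · rw [show altNl cf (x :: t) = 0 by simp [altNl, h]]
      constructor
      · intro z hz; simp at hz
      · intro y hy
        rw [List.drop_zero] at hy
        rcases List.mem_cons.mp hy with rfl | hy'
        · exact le_of_lt (not_le.mp h)
        · exact le_trans (le_of_lt (not_le.mp h)) (hx y hy')

-- sorted-array index bounds
lemma mem_take_le_getD {arr : List Int} (hs : arr.Pairwise (· ≤ ·)) {nl i : Nat}
    (hi : i < arr.length) (h : nl ≤ i + 1) : ∀ x ∈ arr.take nl, x ≤ arr.getD i 0 := by
  intro x hx
  rcases List.mem_take_iff_getElem.mp hx with ⟨j, hj, rfl⟩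
  rw [List.getD_eq_getElem arr 0 hi]
  have hji : j ≤ i := by omega
  rcases eq_or_lt_of_le hji with rfl | hlt
  · exact le_refl _
  · exact List.pairwise_iff_getElem.mp hs j i (by omega) hi hlt

lemma getD_le_mem_drop {arr : List Int} (hs : arr.Pairwise (· ≤ ·)) {i r : Nat}
    (hi : i < arr.length) (h : i ≤ r) : ∀ y ∈ arr.drop r, arr.getD i 0 ≤ y := by
  intro y hy
  rcases List.mem_drop_iff_getElem.mp hy with ⟨j, hj, rfl⟩
  rw [List.getD_eq_getElem arr 0 hi]
  have hij : i ≤ r + j := by omega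
  rcases eq_or_lt_of_le hij with heq | hlt
  · subst heq; exact le_refl _
  · exact List.pairwise_iff_getElem.mp hs i (r + j) hi (by omega) hlt

-- first_at computes each value's first-occurrence index in stops
lemma faFold_spec :
    ∀ (l : List Int) (s : Int) (d : PySem.Dict Int Int) (v : Int),
      ((d.contains v = true →
        ((PySem.List.enumerate l s).foldl
          (fun d iv => if d.contains iv.2 then d else d.insert iv.2 iv.1) d).getD v 0 = d.getD v 0) ∧
       (d.contains v = false → v ∈ l →
        ((PySem.List.enumerate l s).foldl
          (fun d iv => if d.contains iv.2 then d else d.insert iv.2 iv.1) d).getD v 0 = s + (l.idxOf v : Int))) := by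
  intro l
  induction l with
  | nil =>
    intro s d v
    constructor
    · intro _; simp [PySem.List.enumerate]
    · intro _ hv; simp at hv
  | cons x t ih =>
    intro s d v
    rw [PySem.List.enumerate_cons]
    simp only [List.foldl_cons]
    by_cases hc : d.contains x
    · rw [show (if d.contains (s, x).2 then d else d.insert (s, x).2 (s, x).1) = d by simp [hc]]
      constructor
      · intro hv; exact (ih (s + 1) d v).1 hv
      · intro hv hvin
        rcases List.mem_cons.mp hvin with rfl | hvt
        · rw [hv] at hc; cases hc
        · have hvx : v ≠ x := by rintro rfl; rw [hv] at hc; cases hc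
          rw [(ih (s + 1) d v).2 hv hvt, List.idxOf_cons_ne t (Ne.symm hvx)]
          push_cast
          ring
    · rw [show (if d.contains (s, x).2 then d else d.insert (s, x).2 (s, x).1)
            = d.insert x s by simp [hc]]
      constructor
      · intro hv
        have hvx : v ≠ x := by rintro rfl; exact hc hv
        have h1 : (d.insert x s).contains v = true := by
          rw [PySem.Dict.contains_insert]; simp [hv]
        rw [(ih (s + 1) (d.insert x s) v).1 h1, PySem.Dict.getD_insert, if_neg hvx]
      · intro hv hvin
        by_cases hvx : v = x
        · subst hvx
          have h1 : (d.insert v s).contains v = true := by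
            rw [PySem.Dict.contains_insert]; simp
          rw [(ih (s + 1) (d.insert v s) v).1 h1, PySem.Dict.getD_insert, if_pos rfl,
            List.idxOf_cons_self]
          simp
        · have hvt : v ∈ t := (List.mem_cons.mp hvin).resolve_left hvx
          have h0 : (d.insert x s).contains v = false := by
            rw [PySem.Dict.contains_insert]; simp [hv, hvx]
          rw [(ih (s + 1) (d.insert x s) v).2 h0 hvt, List.idxOf_cons_ne t (Ne.symm hvx)]
          push_cast
          ring

lemma altFirstAt_getD {stops : List Int} {v : Int} (hv : v ∈ stops) :
    (altFirstAt stops).getD v 0 = (stops.idxOf v : Int) := by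
  have hc : (PySem.Dict.empty : PySem.Dict Int Int).contains v = false := by
    simp [PySem.Dict.empty, PySem.Dict.contains]
  have := (faFold_spec stops 0 PySem.Dict.empty v).2 hc hv
  unfold altFirstAt
  rw [this]
  ring

-- the head of the subsequence of a- and b-valued elements is decided by the first-occurrence indices
lemma head_filter_two {S : List Int} {a b : Int} (hab : a ≠ b) (ha : a ∈ S) (hb : b ∈ S) :
    (S.filter (fun x => decide (x = a ∨ x = b))).head? =
      some (if S.idxOf a < S.idxOf b then a else b) := by
  induction S with
  | nil => simp at ha
  | cons x t ih =>
    by_cases hxa : x = a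
    · subst hxa
      rw [List.idxOf_cons_self, List.idxOf_cons_ne t hab]
      simp
    · by_cases hxb : x = b
      · subst hxb
        rw [List.idxOf_cons_self, List.idxOf_cons_ne t (Ne.symm hab)]
        simp [Ne.symm hab]
      · have ha' : a ∈ t := (List.mem_cons.mp ha).resolve_left (fun h => hxa h.symm)
        have hb' : b ∈ t := (List.mem_cons.mp hb).resolve_left (fun h => hxb h.symm)
        rw [List.idxOf_cons_ne t (fun h => hxa h), List.idxOf_cons_ne t (fun h => hxb h),
          List.filter_cons_of_neg (by simp [hxa, hxb])]
        rw [ih ha' hb']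
        simp

lemma length_filter_two {a b : Int} (hab : a ≠ b) :
    ∀ l : List Int, (l.filter (fun x => decide (x = a ∨ x = b))).length = l.count a + l.count b := by
  intro l
  induction l with
  | nil => simp
  | cons x t ih =>
    by_cases hxa : x = a
    · rw [List.filter_cons_of_pos (by simp [hxa])]
      simp only [List.length_cons, ih, List.count_cons]
      simp [hxa, hab, Ne.symm hab]
      omega
    · by_cases hxb : x = b
      · rw [List.filter_cons_of_pos (by simp [hxb])]
        simp only [List.length_cons, ih, List.count_cons]
        simp [hxb, hab, Ne.symm hab, hxa]
        omega
      · rw [List.filter_cons_of_neg (by simp [hxa, hxb])]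
        simp only [ih, List.count_cons]
        simp [hxa, hxb]

-- one loop step: A's min-pick is the boundary element B picks (the dichotomy also carries
-- which branch of B's pickLeft test fires)
lemma pick_step (S arr : List Int) (fa : PySem.Dict Int Int)
    (hsort : arr.Pairwise (· ≤ ·))
    (hfa : ∀ v ∈ S, fa.getD v 0 = (S.idxOf v : Int))
    {cur w : Int} {R : List Int} {nl r : Nat}
    (hsub : R.Sublist S)
    (hpermR : R.Perm (arr.take nl ++ arr.drop r))
    (hnlr : nl ≤ r) (hrlen : r ≤ arr.length)
    (hleft : ∀ x ∈ arr.take nl, x ≤ cur)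
    (hright : ∀ y ∈ arr.drop r, cur ≤ y)
    (hQ : ∀ v, v ≠ cur → R.count v = 0 ∨ R.count v = S.count v)
    (hmin : PySem.List.min? R (fun f => |f - cur|) = some w) :
    (0 < nl ∧ w = arr.getD (nl-1) 0 ∧
      (if nl = 0 then false
       else if r = arr.length then true
       else decide (cur - arr.getD (nl-1) 0 < arr.getD r 0 - cur ∨
         (cur - arr.getD (nl-1) 0 = arr.getD r 0 - cur ∧
          fa.getD (arr.getD (nl-1) 0) 0 < fa.getD (arr.getD r 0) 0))) = true) ∨
    (r < arr.length ∧ w = arr.getD r 0 ∧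
      (if nl = 0 then false
       else if r = arr.length then true
       else decide (cur - arr.getD (nl-1) 0 < arr.getD r 0 - cur ∨
         (cur - arr.getD (nl-1) 0 = arr.getD r 0 - cur ∧
          fa.getD (arr.getD (nl-1) 0) 0 < fa.getD (arr.getD r 0) 0))) = false) := by
  have hwR : w ∈ R := PySem.List.min?_mem hmin
  have hkey : ∀ y ∈ R, |w - cur| ≤ |y - cur| := PySem.List.min?_isMin hmin
  have hmemsplit : ∀ x ∈ R, x ∈ arr.take nl ∨ x ∈ arr.drop r :=
    fun x hx => List.mem_append.mp (hpermR.mem_iff.mp hx)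
  have hcount : ∀ v, R.count v = (arr.take nl).count v + (arr.drop r).count v := by
    intro v; rw [List.perm_iff_count.mp hpermR v, List.count_append]
  by_cases hnl0 : nl = 0
  · -- no left part: everything remaining is ≥ cur, the pick is arr[r]
    subst hnl0
    have hwd : w ∈ arr.drop r := by
      rcases hmemsplit w hwR with h | h
      · simp at h
      · exact h
    have hr : r < arr.length := by
      by_contra hc
      rw [List.drop_eq_nil_iff.mpr (by omega)] at hwd
      simp at hwd
    have hbget : arr.getD r 0 = arr[r] := List.getD_eq_getElem arr 0 hr
    have hbd : arr.getD r 0 ∈ arr.drop r := by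
      rw [List.drop_eq_getElem_cons hr, hbget]; exact List.mem_cons_self
    have hbR : arr.getD r 0 ∈ R := by
      rw [← List.count_pos_iff, hcount]
      have := List.count_pos_iff.mpr hbd
      omega
    have h1 : cur ≤ w := hright w hwd
    have h2 : cur ≤ arr.getD r 0 := hright _ hbd
    have h3 : |w - cur| ≤ |arr.getD r 0 - cur| := hkey _ hbR
    rw [abs_of_nonneg (by omega), abs_of_nonneg (by omega)] at h3
    have h4 : arr.getD r 0 ≤ w := getD_le_mem_drop hsort hr le_rfl w hwd
    right
    exact ⟨hr, by omega, by simp⟩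
  · have hnl : 0 < nl := Nat.pos_of_ne_zero hnl0
    have hm : nl - 1 < arr.length := by omega
    have haget : arr.getD (nl-1) 0 = arr[nl-1] := List.getD_eq_getElem arr 0 hm
    have hat : arr.getD (nl-1) 0 ∈ arr.take nl := by
      rw [haget]; exact List.mem_take_iff_getElem.mpr ⟨nl-1, by omega, rfl⟩
    have haR : arr.getD (nl-1) 0 ∈ R := by
      rw [← List.count_pos_iff, hcount]
      have := List.count_pos_iff.mpr hat
      omega
    have ha_cur : arr.getD (nl-1) 0 ≤ cur := hleft _ hat
    have hXtake : ∀ x ∈ arr.take nl, x ≤ arr.getD (nl-1) 0 :=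
      mem_take_le_getD hsort hm (by omega)
    by_cases hreq : r = arr.length
    · -- no right part: the pick is arr[nl-1]
      have hwt : w ∈ arr.take nl := by
        rcases hmemsplit w hwR with h | h
        · exact h
        · rw [List.drop_eq_nil_iff.mpr (by omega)] at h; simp at h
      have h1 : w ≤ cur := hleft w hwt
      have h3 : |w - cur| ≤ |arr.getD (nl-1) 0 - cur| := hkey _ haR
      rw [abs_of_nonpos (by omega), abs_of_nonpos (by omega)] at h3
      have h4 : w ≤ arr.getD (nl-1) 0 := hXtake w hwt
      left
      exact ⟨hnl, by omega, by simp [hnl0, hreq]⟩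
    · have hr : r < arr.length := lt_of_le_of_ne hrlen hreq
      have hbget : arr.getD r 0 = arr[r] := List.getD_eq_getElem arr 0 hr
      have hbd : arr.getD r 0 ∈ arr.drop r := by
        rw [List.drop_eq_getElem_cons hr, hbget]; exact List.mem_cons_self
      have hbR : arr.getD r 0 ∈ R := by
        rw [← List.count_pos_iff, hcount]
        have := List.count_pos_iff.mpr hbd
        omega
      have hcur_b : cur ≤ arr.getD r 0 := hright _ hbd
      have hXdrop : ∀ y ∈ arr.drop r, arr.getD r 0 ≤ y := getD_le_mem_drop hsort hr le_rfl
      set a := arr.getD (nl-1) 0 with hadef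
      set b := arr.getD r 0 with hbdef
      have hka : |a - cur| = cur - a := by rw [abs_of_nonpos (by omega)]; ring
      have hkb : |b - cur| = b - cur := abs_of_nonneg (by omega)
      have hwcases : (w ∈ arr.take nl ∧ cur - w = |w - cur|) ∨ (w ∈ arr.drop r ∧ w - cur = |w - cur|) := by
        rcases hmemsplit w hwR with h | h
        · exact Or.inl ⟨h, by rw [abs_of_nonpos (by have := hleft w h; omega)]; ring⟩
        · exact Or.inr ⟨h, by rw [abs_of_nonneg (by have := hright w h; omega)]⟩
      rcases lt_trichotomy (cur - a) (b - cur) with hda | hda | hda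
      · -- left side strictly nearer
        have hwa : w = a := by
          have h3 : |w - cur| ≤ |a - cur| := hkey _ haR
          rw [hka] at h3
          rcases hwcases with ⟨hwt, hk⟩ | ⟨hwd, hk⟩
          · have := hXtake w hwt; omega
          · have := hXdrop w hwd; omega
        left
        refine ⟨hnl, hwa, ?_⟩
        simp only [if_neg hnl0, if_neg hreq]
        exact decide_eq_true (Or.inl hda)
      · -- exact tie between a and b
        by_cases hab : a = b
        · have hwb : w = b := by
            have h3 : |w - cur| ≤ |a - cur| := hkey _ haR
            rw [hka] at h3
            rcases hwcases with ⟨hwt, hk⟩ | ⟨hwd, hk⟩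
            · have := hXtake w hwt; omega
            · have := hXdrop w hwd; rw [hab] at h3; omega
          right
          refine ⟨hr, hwb, ?_⟩
          simp only [if_neg hnl0, if_neg hreq]
          apply decide_eq_false
          rintro (h | ⟨-, h⟩)
          · omega
          · rw [hab] at h; exact lt_irrefl _ h
        · -- distinct values at equal distance: Python min keeps the S-earlier one
          have hacur : a < cur := by
            rcases lt_or_eq_of_le ha_cur with h | h
            · exact h
            · exfalso; apply hab; omega
          have hcurb : cur < b := by omega
          have hwmem : w = a ∨ w = b := by
            have h3 : |w - cur| ≤ |a - cur| := hkey _ haR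
            rw [hka] at h3
            rcases hwcases with ⟨hwt, hk⟩ | ⟨hwd, hk⟩
            · have := hXtake w hwt; left; omega
            · have := hXdrop w hwd; right; omega
          have hkw : |w - cur| = cur - a := by
            rcases hwmem with rfl | rfl
            · exact hka
            · rw [hkb]; omega
          have haS : a ∈ S := hsub.subset haR
          have hbS : b ∈ S := hsub.subset hbR
          have hcQa : R.count a = S.count a := by
            rcases hQ a (by omega) with h | h
            · exfalso; rw [List.count_eq_zero] at h; exact h haR
            · exact h
          have hcQb : R.count b = S.count b := by
            rcases hQ b (by omega) with h | h
            · exfalso; rw [List.count_eq_zero] at h; exact h hbR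
            · exact h
          -- the filtered subsequences of {a,b}-valued elements agree
          have hfil : R.filter (fun x => decide (x = a ∨ x = b)) =
              S.filter (fun x => decide (x = a ∨ x = b)) := by
            apply (hsub.filter _).eq_of_length
            rw [length_filter_two hab R, length_filter_two hab S, hcQa, hcQb]
          obtain ⟨p, q, hdec, hp⟩ := min?_first hmin
          have hpnone : p.filter (fun x => decide (x = a ∨ x = b)) = [] := by
            rw [List.filter_eq_nil_iff]
            rintro y hy hyd
            have h1 := hp y hy
            rw [hkw] at h1
            rcases of_decide_eq_true hyd with rfl | rfl
            · rw [hka] at h1; omega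
            · rw [hkb] at h1; omega
          have hhead : (R.filter (fun x => decide (x = a ∨ x = b))).head? = some w := by
            rw [hdec, List.filter_append, hpnone, List.nil_append]
            simp [List.filter_cons, if_pos hwmem]
          rw [hfil, head_filter_two hab haS hbS] at hhead
          have hwif : w = if S.idxOf a < S.idxOf b then a else b := by
            exact (Option.some.injEq _ _ ▸ hhead).symm
          have hfaa : fa.getD a 0 = (S.idxOf a : Int) := hfa a haS
          have hfab : fa.getD b 0 = (S.idxOf b : Int) := hfa b hbS
          by_cases hio : S.idxOf a < S.idxOf b
          · left
            refine ⟨hnl, by rw [hwif, if_pos hio], ?_⟩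
            simp only [if_neg hnl0, if_neg hreq]
            apply decide_eq_true
            exact Or.inr ⟨by omega, by rw [hfaa, hfab]; exact_mod_cast hio⟩
          · right
            refine ⟨hr, by rw [hwif, if_neg hio], ?_⟩
            simp only [if_neg hnl0, if_neg hreq]
            apply decide_eq_false
            rintro (h | ⟨-, h⟩)
            · omega
            · rw [hfaa, hfab] at h
              exact hio (by exact_mod_cast h)
      · -- right side strictly nearer
        have hwb : w = b := by
          have h3 : |w - cur| ≤ |b - cur| := hkey _ hbR
          rw [hkb] at h3
          rcases hwcases with ⟨hwt, hk⟩ | ⟨hwd, hk⟩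
          · have := hXtake w hwt; omega
          · have := hXdrop w hwd; omega
        right
        refine ⟨hr, hwb, ?_⟩
        simp only [if_neg hnl0, if_neg hreq]
        apply decide_eq_false
        rintro (h | ⟨h, -⟩) <;> omega

-- the main step-by-step equivalence (invariant: taken stops form a contiguous block of arr,
-- cur bounds the two remaining sides, and any value ≠ cur is fully taken or fully remaining)
theorem altGo_eq (S arr : List Int) (fa : PySem.Dict Int Int)
    (hsort : arr.Pairwise (· ≤ ·))
    (hfa : ∀ v ∈ S, fa.getD v 0 = (S.idxOf v : Int)) :
    ∀ (fuel : Nat) (cur : Int) (R : List Int) (nl r : Nat),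
      fuel = R.length →
      R.Sublist S →
      R.Perm (arr.take nl ++ arr.drop r) →
      nl ≤ r → r ≤ arr.length →
      (∀ x ∈ arr.take nl, x ≤ cur) →
      (∀ y ∈ arr.drop r, cur ≤ y) →
      (∀ v, v ≠ cur → R.count v = 0 ∨ R.count v = S.count v) →
      nearestRouteLoop fuel cur R = altGo arr fa fuel nl r cur := by
  intro fuel
  induction fuel with
  | zero => intro cur R nl r _ _ _ _ _ _ _ _; simp [nearestRouteLoop, altGo]
  | succ k ih =>
    intro cur R nl r hfuel hsub hpermR hnlr hrlen hleft hright hQ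
    obtain ⟨w, hmin⟩ : ∃ w, PySem.List.min? R (fun f => |f - cur|) = some w := by
      cases h : PySem.List.min? R (fun f => |f - cur|) with
      | none =>
        rw [PySem.List.min?_eq_none_iff] at h
        rw [h] at hfuel; simp at hfuel
      | some w => exact ⟨w, rfl⟩
    have hwR : w ∈ R := PySem.List.min?_mem hmin
    have hkey : ∀ y ∈ R, |w - cur| ≤ |y - cur| := PySem.List.min?_isMin hmin
    have hrem : PySem.List.remove? R w = some (R.erase w) := PySem.List.remove?_eq_some_erase R w hwR
    have hA : nearestRouteLoop (k+1) cur R = w :: nearestRouteLoop k w (R.erase w) := by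
      simp [nearestRouteLoop, hmin, hrem]
    have hfuel' : k = (R.erase w).length := by
      rw [List.length_erase_of_mem hwR]; omega
    have hsub' : (R.erase w).Sublist S := (List.erase_sublist).trans hsub
    have hcount : ∀ v, R.count v = (arr.take nl).count v + (arr.drop r).count v := by
      intro v; rw [List.perm_iff_count.mp hpermR v, List.count_append]
    rcases pick_step S arr fa hsort hfa hsub hpermR hnlr hrlen hleft hright hQ hmin with
      ⟨hnl, hw, hPL⟩ | ⟨hr, hw, hPL⟩
    · -- pick the left boundary arr[nl-1]
      obtain ⟨m, rfl⟩ : ∃ m, nl = m + 1 := ⟨nl - 1, by omega⟩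
      have hm : m < arr.length := by omega
      simp only [Nat.add_sub_cancel] at hw hPL
      have hB : altGo arr fa (k+1) (m+1) r cur =
          arr.getD m 0 :: altGo arr fa k m r (arr.getD m 0) := by
        simp only [altGo, Nat.add_sub_cancel]
        rw [hPL]
        simp
      rw [hA, hB, show arr.getD m 0 = w from hw.symm]
      congr 1
      have haget : arr.getD m 0 = arr[m] := List.getD_eq_getElem arr 0 hm
      have htake : arr.take (m+1) = arr.take m ++ [arr[m]] := by
        rw [← List.take_concat_get hm, List.concat_eq_append]
      have hperm' : (R.erase w).Perm (arr.take m ++ arr.drop r) := by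
        rw [List.perm_iff_count]
        intro v
        have hcv := hcount v
        rw [htake, List.count_append] at hcv
        by_cases hv : v = w
        · subst hv
          rw [List.count_erase_self, List.count_append]
          rw [hw, haget] at hcv ⊢
          simp at hcv ⊢
          omega
        · rw [List.count_erase_of_ne hv, List.count_append]
          have : List.count v [arr[m]] = 0 := by
            rw [List.count_eq_zero]
            simp only [List.mem_singleton]
            rw [hw, haget] at hv
            exact fun h => hv h
          omega
      apply ih w (R.erase w) m r hfuel' hsub' hperm' (by omega) hrlen
      · intro x hx
        rw [hw]
        exact mem_take_le_getD hsort hm (by omega) x hx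
      · intro y hy
        rw [hw]
        exact getD_le_mem_drop hsort hm (by omega) y hy
      · intro v hv
        rw [List.count_erase_of_ne hv]
        by_cases hvc : v = cur
        · by_cases hwc : w = cur
          · exact absurd (hvc.trans hwc.symm) hv
          · left
            rw [List.count_eq_zero]
            intro hcR
            have h1 := hkey v hcR
            rw [hvc, sub_self, abs_zero] at h1
            have h2 : |w - cur| = 0 := le_antisymm h1 (abs_nonneg _)
            rw [abs_eq_zero, sub_eq_zero] at h2
            exact hwc h2
        · exact hQ v hvc
    · -- pick the right boundary arr[r]
      have hbget : arr.getD r 0 = arr[r] := List.getD_eq_getElem arr 0 hr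
      have hB : altGo arr fa (k+1) nl r cur =
          arr.getD r 0 :: altGo arr fa k nl (r+1) (arr.getD r 0) := by
        simp only [altGo]
        rw [hPL]
        simp
      rw [hA, hB, show arr.getD r 0 = w from hw.symm]
      congr 1
      have hdropr : arr.drop r = arr[r] :: arr.drop (r+1) := List.drop_eq_getElem_cons hr
      have hperm' : (R.erase w).Perm (arr.take nl ++ arr.drop (r+1)) := by
        rw [List.perm_iff_count]
        intro v
        have hcv := hcount v
        rw [hdropr, List.count_cons] at hcv
        by_cases hv : v = w
        · subst hv
          rw [List.count_erase_self, List.count_append]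
          rw [hw, hbget] at hcv ⊢
          simp at hcv ⊢
          omega
        · rw [List.count_erase_of_ne hv, List.count_append]
          have : ¬ (arr[r] == v) = true := by
            rw [beq_iff_eq]
            rw [hw, hbget] at hv
            exact fun h => hv h.symm
          rw [if_neg this] at hcv
          omega
      apply ih w (R.erase w) nl (r+1) hfuel' hsub' hperm' (by omega) (by omega)
      · intro x hx
        rw [hw]
        exact mem_take_le_getD hsort hr (by omega) x hx
      · intro y hy
        rw [hw]
        exact getD_le_mem_drop hsort hr (by omega) y hy
      · intro v hv
        rw [List.count_erase_of_ne hv]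
        by_cases hvc : v = cur
        · by_cases hwc : w = cur
          · exact absurd (hvc.trans hwc.symm) hv
          · left
            rw [List.count_eq_zero]
            intro hcR
            have h1 := hkey v hcR
            rw [hvc, sub_self, abs_zero] at h1
            have h2 : |w - cur| = 0 := le_antisymm h1 (abs_nonneg _)
            rw [abs_eq_zero, sub_eq_zero] at h2
            exact hwc h2
        · exact hQ v hvc

-- ===== VERDICT (by name: the statement is the Claim_ definition above) =====
theorem nearest_route_spec : Claim_equal_nearest_route := by
  intro cf stops _
  unfold Spec_nearest_route nearest_route nearest_route_alt
  have hperm : (PySem.List.sorted stops (fun x => x)).Perm stops :=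
    PySem.List.sorted_perm stops (fun x => x) false
  have hsort : (PySem.List.sorted stops (fun x => x)).Pairwise (· ≤ ·) := by
    simpa using PySem.List.sorted_pairwise stops (fun x => x)
  have hnl := altNl_spec cf (PySem.List.sorted stops (fun x => x)) hsort
  have hlen : stops.length = (PySem.List.sorted stops (fun x => x)).length :=
    (PySem.List.length_sorted stops (fun x => x) false).symm
  rw [hlen]
  exact altGo_eq stops (PySem.List.sorted stops (fun x => x)) (altFirstAt stops)
    hsort (fun v hv => altFirstAt_getD hv)
    (PySem.List.sorted stops (fun x => x)).length cf stops
    (altNl cf (PySem.List.sorted stops (fun x => x)))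
    (altNl cf (PySem.List.sorted stops (fun x => x)))
    (by rw [hlen])
    (List.Sublist.refl stops)
    (by rw [List.take_append_drop]; exact hperm.symm)
    le_rfl
    (altNl_le_length cf _)
    hnl.1
    hnl.2
    (fun v _ => Or.inr rfl)
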